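-- pv_equiv track=rewrite | github.com/mrditter/Long-Project-3 | build_map.py | is_valid_map
-- ===== SOURCE A (Python) =====
-- def is_valid_map(key):
--     "Checks the validity of the input file"
--     for x, y in key.items() :
--         if type(x) != str:
--             return False
--         elif type(y) != str:
--             return False
--         elif len(x) != 1:
--             return False
--         elif len(y) != 1:
--             return False
--         elif x in " \t\n" :
--             return False
--         elif y in " \t\n" :
--             return False
--     dup_to = 0
--     for x in key.values():
--         dup_to = 0
--         for y in key.values():
--             if x == y:
--                 dup_to += 1
--         if dup_to > 1:
--             return False
--     if len(key.items()) != len(key.keys()) :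
--         return False
--     return True
-- ===== SOURCE B (Python) =====
-- def is_valid_map(key):
--     "Checks the validity of the input file"
--     seen = set()
--     for x, y in key.items():
--         if type(x) != str or type(y) != str or len(x) != 1 or len(y) != 1 \
--            or x in " \t\n" or y in " \t\n":
--             return False
--         if y in seen:
--             return False
--         seen.add(y)
--     return True
-- ===== Notes on version B (the rewrite author's own statement) =====
-- stated objective: alternative
-- what changed: B fuses A's separate validation loop and its nested duplicate-count scan over the values into one single pass that maintains a set of values already seen, and drops the always-true len(items)==len(keys) check.
import Mathlib
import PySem

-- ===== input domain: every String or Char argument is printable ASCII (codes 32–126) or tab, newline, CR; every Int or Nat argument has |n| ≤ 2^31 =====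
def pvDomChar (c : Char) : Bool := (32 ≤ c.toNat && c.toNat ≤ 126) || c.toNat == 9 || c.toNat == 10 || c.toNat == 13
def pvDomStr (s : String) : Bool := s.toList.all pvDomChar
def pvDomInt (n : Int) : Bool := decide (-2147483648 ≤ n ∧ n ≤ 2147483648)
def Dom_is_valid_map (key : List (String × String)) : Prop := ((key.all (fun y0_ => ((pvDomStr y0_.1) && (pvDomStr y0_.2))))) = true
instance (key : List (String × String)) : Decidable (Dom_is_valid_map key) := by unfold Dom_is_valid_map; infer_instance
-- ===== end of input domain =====

-- B fuses A's validation loop and its nested duplicate scan of the values into one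
-- pass over the items that maintains a set of already-seen values (alternative single-pass algorithm).


-- ===== PORT A =====
-- first loop over key.items(): per-item checks, early 'return False' = some false
-- (the 'type(x) != str' / 'type(y) != str' branches can never fire here: the argument
--  type already guarantees both components are strings)
def pvACheck : List (String × String) → Option Bool
  | [] => none
  | (x, y) :: rest =>
    if PySem.Str.len x ≠ 1 then some false
    else if PySem.Str.len y ≠ 1 then some false
    else if PySem.Str.isIn x " \t\n" then some false
    else if PySem.Str.isIn y " \t\n" then some false
    else pvACheck rest

-- inner loop: dup_to = 0; for y in key.values(): if x == y: dup_to += 1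
def pvACount (x : String) (vals : List String) : Int :=
  vals.foldl (fun dup_to y => if x == y then dup_to + 1 else dup_to) 0

-- outer loop of the duplicate scan: for x in key.values(): … if dup_to > 1: return False
def pvADup (vals all : List String) : Option Bool :=
  match vals with
  | [] => none
  | x :: rest => if pvACount x all > 1 then some false else pvADup rest all

def is_valid_map (key : List (String × String)) : Bool :=
  match pvACheck key with
  | some b => b
  | none =>
    match pvADup (key.map Prod.snd) (key.map Prod.snd) with
    | some b => b
    | none => if key.length ≠ key.length then false else true

-- ===== PORT B =====
-- single pass with a set 'seen' of values already encountered
def pvBLoop (seen : PySem.Set String) : List (String × String) → Bool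
  | [] => true
  | (x, y) :: rest =>
    if (PySem.Str.len x != 1) || (PySem.Str.len y != 1) ||
       PySem.Str.isIn x " \t\n" || PySem.Str.isIn y " \t\n" then false
    else if seen.contains y then false
    else pvBLoop (seen.add y) rest

def is_valid_map_alt (key : List (String × String)) : Bool :=
  pvBLoop PySem.Set.empty key

-- ===== PRECONDITION & SPEC =====
def Spec_is_valid_map (key : List (String × String)) (out : Bool) : Prop := out = is_valid_map_alt key
instance (key : List (String × String)) (out : Bool) : Decidable (Spec_is_valid_map key out) := by unfold Spec_is_valid_map; infer_instance

-- ===== CLAIM (what is proved, stated in full; the proofs are below) =====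
def Claim_equal_is_valid_map : Prop := ∀ (key : List (String × String)), Dom_is_valid_map key → Spec_is_valid_map key (is_valid_map key)

-- ===== LEMMAS AND PROOFS =====

-- an item passes all of A's (and B's) per-item checks
def pvOk (p : String × String) : Bool :=
  (PySem.Str.len p.1 == 1) && (PySem.Str.len p.2 == 1) &&
  !PySem.Str.isIn p.1 " \t\n" && !PySem.Str.isIn p.2 " \t\n"

theorem pvFail_eq (x y : String) :
    ((PySem.Str.len x != 1) || (PySem.Str.len y != 1) ||
      PySem.Str.isIn x " \t\n" || PySem.Str.isIn y " \t\n") = !pvOk (x, y) := by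
  simp only [pvOk, bne]
  cases PySem.Str.len x == 1 <;> cases PySem.Str.len y == 1 <;>
    cases PySem.Str.isIn x " \t\n" <;> cases PySem.Str.isIn y " \t\n" <;> rfl

theorem pvACheck_step (x y : String) (rest : List (String × String)) :
    pvACheck ((x, y) :: rest) = if pvOk (x, y) then pvACheck rest else some false := by
  have h := pvFail_eq x y
  simp only [bne] at h
  show (if PySem.Str.len x ≠ 1 then some false
    else if PySem.Str.len y ≠ 1 then some false
    else if PySem.Str.isIn x " \t\n" then some false
    else if PySem.Str.isIn y " \t\n" then some false
    else pvACheck rest) = _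
  cases hok : pvOk (x, y) <;> rw [hok] at h <;> split_ifs <;> simp_all

theorem pvACheck_eq (l : List (String × String)) :
    pvACheck l = if l.all pvOk then none else some false := by
  induction l with
  | nil => simp [pvACheck]
  | cons p rest ih =>
    obtain ⟨x, y⟩ := p
    rw [pvACheck_step, ih, List.all_cons]
    cases hok : pvOk (x, y)
    · rw [Bool.false_and]
      simp
    · rw [Bool.true_and, if_pos rfl]

theorem pvACount_eq (x : String) (l : List String) : pvACount x l = (l.count x : Int) := by
  have h : pvACount x l
      = List.foldl (fun acc y => if (y == x) = true then acc + 1 else acc) 0 l := by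
    unfold pvACount
    congr 1
    funext d y
    by_cases hxy : x = y
    · simp [hxy]
    · simp [hxy, Ne.symm hxy]
  rw [h, PySem.List.foldl_beq_add_one]
  simp

theorem pvADup_eq (vals all : List String) :
    pvADup vals all
      = if vals.all (fun x => decide (all.count x ≤ 1)) then none else some false := by
  induction vals with
  | nil => simp [pvADup]
  | cons x rest ih =>
    rw [show pvADup (x :: rest) all
        = if pvACount x all > 1 then some false else pvADup rest all from rfl,
      pvACount_eq, ih, List.all_cons]
    by_cases h : all.count x ≤ 1
    · have h2 : ¬ ((all.count x : Int) > 1) := by exact_mod_cast not_lt.mpr h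
      simp only [h2, if_false, h, decide_true, Bool.true_and]
    · have h2 : (all.count x : Int) > 1 := by exact_mod_cast not_le.mp h
      simp [h2, h]

theorem is_valid_map_iff (key : List (String × String)) :
    is_valid_map key = true ↔
      (∀ p ∈ key, pvOk p = true) ∧ (key.map Prod.snd).Nodup := by
  unfold is_valid_map
  rw [pvACheck_eq, pvADup_eq]
  by_cases hok : key.all pvOk
  · simp only [hok, if_true]
    by_cases hd : (key.map Prod.snd).all
        (fun x => decide ((key.map Prod.snd).count x ≤ 1))
    · simp only [hd, if_true]
      constructor
      · intro _
        refine ⟨by simpa [List.all_eq_true] using hok, ?_⟩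
        rw [List.nodup_iff_count_le_one]
        intro a
        by_cases ha : a ∈ key.map Prod.snd
        · simpa using (List.all_eq_true.mp hd) a ha
        · simp [List.count_eq_zero_of_not_mem ha]
      · intro _; simp
    · simp only [hd, Bool.false_eq_true, if_false]
      constructor
      · intro h; cases h
      · rintro ⟨-, hnd⟩
        exfalso
        apply hd
        rw [List.all_eq_true]
        intro a _
        simpa using (List.nodup_iff_count_le_one.mp hnd) a
  · simp only [hok, Bool.false_eq_true, if_false]
    constructor
    · intro h; cases h
    · rintro ⟨hall, -⟩
      exact absurd (List.all_eq_true.mpr hall) hok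

theorem pvBLoop_step (x y : String) (rest : List (String × String))
    (seen : PySem.Set String) :
    pvBLoop seen ((x, y) :: rest)
      = if pvOk (x, y) then
          (if seen.contains y then false else pvBLoop (seen.add y) rest)
        else false := by
  rw [show pvBLoop seen ((x, y) :: rest)
      = if ((PySem.Str.len x != 1) || (PySem.Str.len y != 1) ||
            PySem.Str.isIn x " \t\n" || PySem.Str.isIn y " \t\n") then false
        else if seen.contains y then false else pvBLoop (seen.add y) rest from rfl,
    pvFail_eq]
  cases pvOk (x, y) <;> simp

theorem pvBLoop_iff (l : List (String × String)) (seen : PySem.Set String) :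
    pvBLoop seen l = true ↔
      (∀ p ∈ l, pvOk p = true) ∧ (l.map Prod.snd).Nodup ∧
      ∀ y ∈ l.map Prod.snd, y ∉ seen := by
  induction l generalizing seen with
  | nil => simp [pvBLoop]
  | cons p rest ih =>
    obtain ⟨x, y⟩ := p
    rw [pvBLoop_step]
    by_cases hok : pvOk (x, y) = true
    · rw [if_pos hok]
      by_cases hy : y ∈ seen
      · have hc : seen.contains y = true := (PySem.Set.contains_iff seen y).mpr hy
        rw [hc, if_pos rfl]
        constructor
        · intro h; cases h
        · rintro ⟨-, -, hno⟩
          exact absurd hy (hno y (by simp))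
      · have hc : seen.contains y = false := by
          cases h : seen.contains y
          · rfl
          · exact absurd ((PySem.Set.contains_iff seen y).mp h) hy
        rw [hc, if_neg (by simp), ih]
        constructor
        · rintro ⟨hall, hnd, hno⟩
          refine ⟨?_, ?_, ?_⟩
          · intro q hq
            rw [List.mem_cons] at hq
            rcases hq with hq | hq
            · subst hq; exact hok
            · exact hall q hq
          · simp only [List.map_cons, List.nodup_cons]
            refine ⟨?_, hnd⟩
            intro hyin
            exact absurd ((PySem.Set.mem_add seen y y).mpr (Or.inr rfl)) (hno y hyin)
          · intro z hz
            simp only [List.map_cons, List.mem_cons] at hz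
            rcases hz with hz | hz
            · subst hz; exact hy
            · intro hzs
              exact hno z hz ((PySem.Set.mem_add seen y z).mpr (Or.inl hzs))
        · rintro ⟨hall, hnd, hno⟩
          simp only [List.map_cons, List.nodup_cons] at hnd
          refine ⟨?_, hnd.2, ?_⟩
          · intro q hq; exact hall q (List.mem_cons_of_mem _ hq)
          · intro z hz hzadd
            rcases (PySem.Set.mem_add seen y z).mp hzadd with hzs | hzy
            · exact hno z (by simp [hz]) hzs
            · subst hzy; exact hnd.1 hz
    · rw [if_neg hok]
      constructor
      · intro h; cases h
      · rintro ⟨hall, -, -⟩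
        exact absurd (hall (x, y) (by simp)) hok

theorem is_valid_map_alt_iff (key : List (String × String)) :
    is_valid_map_alt key = true ↔
      (∀ p ∈ key, pvOk p = true) ∧ (key.map Prod.snd).Nodup := by
  unfold is_valid_map_alt
  rw [pvBLoop_iff]
  simp [PySem.Set.empty]

-- ===== VERDICT (by name: the statement is the Claim_ definition above) =====
theorem is_valid_map_spec : Claim_equal_is_valid_map := by
  intro key _
  unfold Spec_is_valid_map
  rw [Bool.eq_iff_iff, is_valid_map_iff, is_valid_map_alt_iff]
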